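-- pv_equiv track=rewrite | github.com/jkatofsky/ACSL | Intermediate_2017-18_#3.py | getAngle
-- ===== SOURCE A (Python) =====
-- def getAngle (turnValue):
-- 	if turnValue is 0:
-- 		return 180
-- 	angle = 0
-- 	for i in range (turnValue):
-- 		angle += 90
-- 	if angle > 360:
-- 		angle = angle % 360
-- 	return angle
-- ===== SOURCE B (Python) =====
-- def getAngle(turnValue):
--     if turnValue <= 0:
--         return 180 if turnValue == 0 else 0
--     if turnValue <= 4:
--         return 90 * turnValue
--     return 90 * (turnValue % 4)
-- ===== Notes on version B (the rewrite author's own statement) =====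
-- stated objective: faster
-- what changed: Replaces the O(n) loop adding 90 per iteration (plus a >360 mod patch) with a direct case table: 0 for non-positive, 90*t up to 4, and 90*(t mod 4) beyond.
import Mathlib
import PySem

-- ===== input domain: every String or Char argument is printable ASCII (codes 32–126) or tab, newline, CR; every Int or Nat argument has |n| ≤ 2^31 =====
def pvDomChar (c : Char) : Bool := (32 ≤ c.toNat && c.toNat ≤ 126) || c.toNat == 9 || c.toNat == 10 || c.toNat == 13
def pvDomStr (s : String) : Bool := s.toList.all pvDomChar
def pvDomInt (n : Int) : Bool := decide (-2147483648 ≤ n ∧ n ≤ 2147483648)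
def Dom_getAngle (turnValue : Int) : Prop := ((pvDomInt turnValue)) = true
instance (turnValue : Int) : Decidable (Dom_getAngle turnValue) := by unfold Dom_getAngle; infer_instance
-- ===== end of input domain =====

-- B replaces A's O(n) accumulation loop (and its >360 mod patch) by a direct O(1) case table.

-- ===== PORT A =====
def getAngle (turnValue : Int) : Int :=
  if turnValue = 0 then 180
  else
    let angle := (PySem.List.pyRange 0 turnValue 1).foldl (fun a _ => a + 90) 0
    if angle > 360 then PySem.Int.mod angle 360 else angle

-- ===== PORT B =====
def getAngle_alt (turnValue : Int) : Int :=
  if turnValue ≤ 0 then (if turnValue = 0 then 180 else 0)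
  else if turnValue ≤ 4 then 90 * turnValue
  else 90 * PySem.Int.mod turnValue 4

-- ===== PRECONDITION & SPEC =====
def Spec_getAngle (turnValue : Int) (out : Int) : Prop := out = getAngle_alt turnValue
instance (turnValue : Int) (out : Int) : Decidable (Spec_getAngle turnValue out) := by unfold Spec_getAngle; infer_instance

-- ===== CLAIM =====
def Claim_equal_getAngle : Prop := ∀ (turnValue : Int), Dom_getAngle turnValue → Spec_getAngle turnValue (getAngle turnValue)

-- ===== LEMMAS AND PROOFS =====
theorem foldl_add90 (l : List Int) (init : Int) :
    l.foldl (fun a _ => a + 90) init = init + 90 * l.length := by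
  induction l generalizing init with
  | nil => simp
  | cons x xs ih => simp [List.foldl, ih]; ring

-- ===== VERDICT =====
theorem getAngle_spec : Claim_equal_getAngle := by
  intro t _
  unfold Spec_getAngle getAngle getAngle_alt
  rw [foldl_add90, PySem.List.length_pyRange_one]
  rcases lt_trichotomy t 0 with h | h | h
  · simp [h.ne, h.le]
  · simp [h]
  · simp only [PySem.Int.mod_eq_emod_of_pos (by norm_num : (0:Int) < 360),
      PySem.Int.mod_eq_emod_of_pos (by norm_num : (0:Int) < 4)]
    split_ifs <;> omega
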